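-- pv_equiv track=rewrite | github.com/NguyetHue/PTTK_TTNC | bai4-1.py | compute
-- ===== SOURCE A (Python) =====
-- def compute(numProjects, maxResources, arr):
--     previous_stage = [0 for x in range(maxResources)]
--     current_stage = [0 for x in range(maxResources)]
--     root = [0, 0, 0, None]
--     current_node = None
--     for i in range(maxResources):
--         current_node = [1, i, arr[0][i], root]
--         previous_stage[i] = current_node
--
--     for i in range(2, numProjects):
--         for j in range(maxResources):
--             current_node = [i, j, 0, None]
--             current_stage[j] = current_node
--             for k in range(j + 1):
--                 past_node = previous_stage[j - k]
--                 profit = arr[i - 1][k]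
--                 cum_profit = profit + past_node[-2]
--                 if cum_profit >= current_node[-2]:
--                     current_node[-2] = cum_profit
--                     current_node[-1] = past_node
--
--         for j in range(maxResources):
--             previous_stage[j] = current_stage[j]
--
--     result = [numProjects + 1, maxResources - 1, 0, None]
--     for i in range(maxResources):
--         j = maxResources - 1 - i
--         past_node = previous_stage[i]
--         profit = arr[numProjects - 1][j]
--         cum_profit = profit + past_node[-2]
--         if cum_profit >= result[-2]:
--             result[-2] = cum_profit
--             result[-1] = past_node
--             result[1] = j + past_node[1]
--
--     return result[-2]
-- ===== SOURCE B (Python) =====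
-- def compute(numProjects, maxResources, arr):
--     # Memoized recursion on the DP value only; no node objects, no stage arrays.
--     memo = {}
--
--     def D(s, j):
--         # best cumulative profit after stages 1..s using j resource units
--         if s <= 1:
--             return arr[0][j]
--         if (s, j) not in memo:
--             memo[(s, j)] = max(0, max(arr[s - 1][k] + D(s - 1, j - k)
--                                       for k in range(j + 1)))
--         return memo[(s, j)]
--
--     s_last = max(1, numProjects - 1)
--     best = 0
--     for i in range(maxResources):
--         c = arr[numProjects - 1][maxResources - 1 - i] + D(s_last, i)
--         if c > best:
--             best = c
--     return best
-- ===== Notes on version B (the rewrite author's own statement) =====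
-- stated objective: simpler
-- what changed: Replaces A's linked-list node objects ([stage, j, value, parent] lists with back-pointers) and explicit previous/current stage arrays by a plain memoized recursive function D(s, j) that computes only the numeric DP value, plus a running max over the last stage.
import Mathlib
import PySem

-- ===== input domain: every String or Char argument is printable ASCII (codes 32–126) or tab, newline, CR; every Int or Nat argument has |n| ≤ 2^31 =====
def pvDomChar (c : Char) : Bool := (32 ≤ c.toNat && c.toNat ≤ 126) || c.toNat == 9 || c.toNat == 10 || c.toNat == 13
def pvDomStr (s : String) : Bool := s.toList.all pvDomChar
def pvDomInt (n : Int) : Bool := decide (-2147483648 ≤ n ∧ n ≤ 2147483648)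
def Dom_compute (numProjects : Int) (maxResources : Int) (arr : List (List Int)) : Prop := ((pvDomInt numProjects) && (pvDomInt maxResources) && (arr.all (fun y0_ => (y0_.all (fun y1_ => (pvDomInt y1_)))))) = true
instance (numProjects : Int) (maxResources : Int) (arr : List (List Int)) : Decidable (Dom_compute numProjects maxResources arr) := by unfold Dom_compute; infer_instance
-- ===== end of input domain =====

-- B replaces A's linked-list node bookkeeping by a plain memoized recursion on the numeric DP value (objective: simpler; same asymptotic cost).

-- ===== PORT A =====
-- A's nodes are Python lists [stage, j, value, parent]; ported as an inductive with a `none` parent case.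
inductive PyNode where
  | none
  | mk (stage : Int) (res : Int) (val : Int) (parent : PyNode)
deriving Repr

def PyNode.val : PyNode → Int
  | .none => 0
  | .mk _ _ v _ => v

def PyNode.res : PyNode → Int
  | .none => 0
  | .mk _ r _ _ => r

-- the inner k-loop building current_stage[j]
def innerA (arr : List (List Int)) (prev : List PyNode) (i j : Int) : PyNode :=
  (PySem.List.pyRange 0 (j + 1) 1).foldl
    (fun cur k =>
      let past := PySem.List.pyGetD prev (j - k) PyNode.none
      let profit := PySem.List.pyGetD (PySem.List.pyGetD arr (i - 1) []) k 0
      let cum := profit + past.val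
      if cur.val ≤ cum then PyNode.mk i j cum past else cur)
    (PyNode.mk i j 0 PyNode.none)

def compute (numProjects : Int) (maxResources : Int) (arr : List (List Int)) : Int :=
  let root := PyNode.mk 0 0 0 PyNode.none
  let prev0 := (PySem.List.pyRange 0 maxResources 1).map
    (fun i => PyNode.mk 1 i (PySem.List.pyGetD (PySem.List.pyGetD arr 0 []) i 0) root)
  let prev := (PySem.List.pyRange 2 numProjects 1).foldl
    (fun prev i => (PySem.List.pyRange 0 maxResources 1).map (fun j => innerA arr prev i j))
    prev0
  let result := (PySem.List.pyRange 0 maxResources 1).foldl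
    (fun res i =>
      let j := maxResources - 1 - i
      let past := PySem.List.pyGetD prev i PyNode.none
      let profit := PySem.List.pyGetD (PySem.List.pyGetD arr (numProjects - 1) []) j 0
      let cum := profit + past.val
      if res.val ≤ cum then PyNode.mk (numProjects + 1) (j + past.res) cum past else res)
    (PyNode.mk (numProjects + 1) (maxResources - 1) 0 PyNode.none)
  result.val

-- ===== PORT B =====
-- Source B's D(s, j); s is the Python stage number (always ≥ 1 at call sites), taken as a Nat for structural recursion.
def altD (arr : List (List Int)) : Nat → Int → Int
  | 0, j => PySem.List.pyGetD (PySem.List.pyGetD arr 0 []) j 0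
  | 1, j => PySem.List.pyGetD (PySem.List.pyGetD arr 0 []) j 0
  | (s + 2), j =>
    let cands := (PySem.List.pyRange 0 (j + 1) 1).map
      (fun k => PySem.List.pyGetD (PySem.List.pyGetD arr ((s : Int) + 1) []) k 0 + altD arr (s + 1) (j - k))
    max 0 ((PySem.List.max? cands (fun x => x)).getD 0)

def compute_alt (numProjects : Int) (maxResources : Int) (arr : List (List Int)) : Int :=
  let sLast := max 1 (numProjects - 1)
  (PySem.List.pyRange 0 maxResources 1).foldl
    (fun best i =>
      let c := PySem.List.pyGetD (PySem.List.pyGetD arr (numProjects - 1) []) (maxResources - 1 - i) 0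
               + altD arr sLast.toNat i
      if best < c then c else best)
    0

-- ===== PRECONDITION & SPEC =====
-- Pre_ excludes exactly the inputs where Python A raises IndexError: with maxResources > 0 it
-- indexes arr[0][0..m-1], arr[i-1][0..m-1] for i in range(2, numProjects), and arr[numProjects-1][0..m-1].
def Pre_compute (numProjects : Int) (maxResources : Int) (arr : List (List Int)) : Prop :=
  maxResources ≤ 0 ∨
    (arr ≠ [] ∧ maxResources ≤ ((arr.headD []).length : Int) ∧
     (∀ i ∈ PySem.List.pyRange 2 numProjects 1,
        i - 1 < (arr.length : Int) ∧ maxResources ≤ ((PySem.List.pyGetD arr (i - 1) []).length : Int)) ∧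
     PySem.Raise.InRange arr.length (numProjects - 1) ∧
     maxResources ≤ ((PySem.List.pyGetD arr (numProjects - 1) []).length : Int))

instance (numProjects : Int) (maxResources : Int) (arr : List (List Int)) : Decidable (Pre_compute numProjects maxResources arr) := by
  unfold Pre_compute; infer_instance

def pvWitness_compute : Int × Int × List (List Int) := (3, 2, [[1, 2], [3, 4], [5, 6]])

def Spec_compute (numProjects : Int) (maxResources : Int) (arr : List (List Int)) (out : Int) : Prop := out = compute_alt numProjects maxResources arr
instance (numProjects : Int) (maxResources : Int) (arr : List (List Int)) (out : Int) : Decidable (Spec_compute numProjects maxResources arr out) := by unfold Spec_compute; infer_instance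

-- ===== CLAIM (what is proved, stated in full; the proofs are below) =====
def Claim_equal_compute : Prop := ∀ (numProjects : Int) (maxResources : Int) (arr : List (List Int)), Dom_compute numProjects maxResources arr → Pre_compute numProjects maxResources arr → Spec_compute numProjects maxResources arr (compute numProjects maxResources arr)

-- ===== LEMMAS AND PROOFS =====

theorem val_ite (c : Prop) [Decidable c] (st j cum : Int) (p alt : PyNode) :
    (if c then PyNode.mk st j cum p else alt).val = if c then cum else alt.val := by
  split <;> rfl

theorem foldl_maxf_comm (f : Int → Int) (t : List Int) :
    ∀ a b : Int, t.foldl (fun x y => max x (f y)) (max a b) = max a (t.foldl (fun x y => max x (f y)) b) := by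
  induction t with
  | nil => intro a b; rfl
  | cons x t ih =>
    intro a b
    simp only [List.foldl_cons]
    rw [max_assoc, ih]

-- A's ≥-update loop computes a running max of the candidate values.
theorem val_foldl (f : Int → Int) (step : PyNode → Int → PyNode)
    (h : ∀ res k, (step res k).val = if res.val ≤ f k then f k else res.val) :
    ∀ (l : List Int) (res : PyNode),
      (l.foldl step res).val = l.foldl (fun a k => max a (f k)) res.val := by
  intro l
  induction l with
  | nil => intro res; rfl
  | cons x t ih =>
    intro res
    simp only [List.foldl_cons]
    rw [ih, h, max_def]

-- B's max(0, max(list-over-range)) equals the same running max from 0.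
theorem max0_max?_range (f : Int → Int) (j : Int) (hj : 0 ≤ j) :
    max 0 ((PySem.List.max? ((PySem.List.pyRange 0 (j + 1) 1).map f) (fun x => x)).getD 0)
      = (PySem.List.pyRange 0 (j + 1) 1).foldl (fun a k => max a (f k)) 0 := by
  rw [PySem.List.pyRange_one_cons (by omega)]
  simp only [List.map_cons, PySem.List.max?_id_cons, Option.getD_some, List.foldl_cons]
  rw [List.foldl_map, foldl_maxf_comm]

-- the invariant: previous_stage holds the stage-s DP values
def InvP (arr : List (List Int)) (m : Int) (prev : List PyNode) (s : Int) : Prop :=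
  ∀ t : Int, 0 ≤ t → t < m → (PySem.List.pyGetD prev t PyNode.none).val = altD arr s.toNat t

theorem stage_step (arr : List (List Int)) (m : Int) (prev : List PyNode) (i : Int)
    (hi : 2 ≤ i) (hInv : InvP arr m prev (i - 1)) :
    InvP arr m ((PySem.List.pyRange 0 m 1).map (fun j => innerA arr prev i j)) i := by
  intro t ht htm
  rw [PySem.List.pyGetD_map_pyRange_of_nonneg _ _ _ _ ht htm]
  obtain ⟨s, hs⟩ : ∃ s : Nat, i.toNat = s + 2 := ⟨i.toNat - 2, by omega⟩
  rw [hs]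
  have h1 : ((s : Int) + 1) = i - 1 := by omega
  have h2 : (s + 1 : Nat) = (i - 1).toNat := by omega
  simp only [altD, h1, h2]
  rw [max0_max?_range _ _ ht]
  unfold innerA
  rw [val_foldl (fun k => PySem.List.pyGetD (PySem.List.pyGetD arr (i - 1) []) k 0
        + (PySem.List.pyGetD prev (t - k) PyNode.none).val)
      _ (by intro res k; dsimp only; rw [val_ite])]
  apply PySem.List.foldl_congr_mem
  intro acc k hk
  rw [PySem.List.mem_pyRange_one] at hk
  rw [hInv (t - k) (by omega) (by omega)]

theorem stage_fold (arr : List (List Int)) (m n : Int) :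
    ∀ (c : Nat) (a : Int) (prev : List PyNode), 2 ≤ a → c = (n - a).toNat →
      InvP arr m prev (a - 1) →
      InvP arr m
        ((PySem.List.pyRange a n 1).foldl
          (fun prev i => (PySem.List.pyRange 0 m 1).map (fun j => innerA arr prev i j)) prev)
        (max (a - 1) (n - 1)) := by
  intro c
  induction c with
  | zero =>
    intro a prev ha hc hInv
    rw [PySem.List.pyRange_one_eq_nil (show n ≤ a by omega)]
    rw [max_eq_left (show n - 1 ≤ a - 1 by omega)]
    exact hInv
  | succ c ih =>
    intro a prev ha hc hInv
    have han : a < n := by omega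
    rw [PySem.List.pyRange_one_cons han]
    simp only [List.foldl_cons]
    have := ih (a + 1) ((PySem.List.pyRange 0 m 1).map (fun j => innerA arr prev a j))
      (by omega) (by omega)
      (by simpa using stage_step arr m prev a ha hInv)
    have hmax : max (a + 1 - 1) (n - 1) = max (a - 1) (n - 1) := by
      rw [max_eq_right (show a + 1 - 1 ≤ n - 1 by omega), max_eq_right (show a - 1 ≤ n - 1 by omega)]
    rwa [hmax] at this

theorem if_lt_max (b c : Int) : (if b < c then c else b) = max b c := by
  rcases lt_or_ge b c with h | h
  · simp [h, max_eq_right h.le]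
  · simp [not_lt.mpr h, max_eq_left h]

theorem compute_eq (numProjects maxResources : Int) (arr : List (List Int)) :
    compute numProjects maxResources arr = compute_alt numProjects maxResources arr := by
  unfold compute compute_alt
  simp only []
  have hInv0 : InvP arr maxResources
      ((PySem.List.pyRange 0 maxResources 1).map
        (fun i => PyNode.mk 1 i (PySem.List.pyGetD (PySem.List.pyGetD arr 0 []) i 0) (PyNode.mk 0 0 0 PyNode.none)))
      (2 - 1) := by
    intro t ht htm
    rw [PySem.List.pyGetD_map_pyRange_of_nonneg _ _ _ _ ht htm]
    rfl
  have hInv := stage_fold arr maxResources numProjects (numProjects - 2).toNat 2 _ (by omega) rfl hInv0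
  rw [show ((2 : Int) - 1) = 1 by norm_num] at hInv
  rw [val_foldl (fun i =>
        PySem.List.pyGetD (PySem.List.pyGetD arr (numProjects - 1) []) (maxResources - 1 - i) 0
        + (PySem.List.pyGetD
            ((PySem.List.pyRange 2 numProjects 1).foldl
              (fun prev i => (PySem.List.pyRange 0 maxResources 1).map (fun j => innerA arr prev i j))
              ((PySem.List.pyRange 0 maxResources 1).map
                (fun i => PyNode.mk 1 i (PySem.List.pyGetD (PySem.List.pyGetD arr 0 []) i 0) (PyNode.mk 0 0 0 PyNode.none))))
            i PyNode.none).val)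
      _ (by intro res k; dsimp only; rw [val_ite])]
  apply PySem.List.foldl_congr_mem
  intro acc i hi
  rw [PySem.List.mem_pyRange_one] at hi
  rw [if_lt_max, hInv i hi.1 hi.2]

-- ===== VERDICT (by name: the statement is the Claim_ definition above) =====
theorem compute_spec : Claim_equal_compute := by
  intro numProjects maxResources arr _ _
  unfold Spec_compute
  exact compute_eq numProjects maxResources arr
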